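-- pv_equiv track=rewrite | github.com/Midhilesh4890/Leetcode-Problems | Google/Onsite/buysellstockreverse.py | longest_loss_period
-- ===== SOURCE A (Python) =====
-- def longest_loss_period(prices):
--     min_price = float('inf')  # Track the minimum price seen so far
--     min_time = None  # Track the time when min_price occurred
--     longest_duration = 0  # Store the longest period of loss
--
--     for time, price in prices:
--         if price < min_price:
--             min_price = price
--             min_time = time  # Update minimum price time
--
--         if price > min_price:  # Loss period ends
--             longest_duration = max(longest_duration, time - min_time)
--
--     return longest_duration
--
-- prices = [
--     (100, 5),
--     (200, 6),
--     (300, 2),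
--     (400, 5),
--     (500, 5),
--     (600, 7)
-- ]
-- ===== SOURCE B (Python) =====
-- def longest_loss_period(prices):
--     # Segment decomposition: the sequence splits into maximal segments, each
--     # headed by a strict running minimum. Within a segment every later price is
--     # >= the head price; only strictly greater ones can end a loss period, and
--     # the best such period in the segment is (max time among them) - head time.
--     best = 0
--     i, n = 0, len(prices)
--     while i < n:
--         seg_time, seg_price = prices[i]
--         seg_best = None
--         i += 1
--         while i < n and prices[i][1] >= seg_price:
--             t, p = prices[i]
--             if p > seg_price:
--                 seg_best = t if seg_best is None else max(seg_best, t)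
--             i += 1
--         if seg_best is not None:
--             best = max(best, seg_best - seg_time)
--     return best
-- ===== Notes on version B (the rewrite author's own statement) =====
-- stated objective: alternative
-- what changed: B partitions the sequence into maximal segments each headed by a strict running minimum (nested index loops) and reduces every segment to the maximum time among its strictly-higher prices minus the head time, instead of A's single fused loop carrying a mutable running minimum and an on-the-fly max.
import Mathlib
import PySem

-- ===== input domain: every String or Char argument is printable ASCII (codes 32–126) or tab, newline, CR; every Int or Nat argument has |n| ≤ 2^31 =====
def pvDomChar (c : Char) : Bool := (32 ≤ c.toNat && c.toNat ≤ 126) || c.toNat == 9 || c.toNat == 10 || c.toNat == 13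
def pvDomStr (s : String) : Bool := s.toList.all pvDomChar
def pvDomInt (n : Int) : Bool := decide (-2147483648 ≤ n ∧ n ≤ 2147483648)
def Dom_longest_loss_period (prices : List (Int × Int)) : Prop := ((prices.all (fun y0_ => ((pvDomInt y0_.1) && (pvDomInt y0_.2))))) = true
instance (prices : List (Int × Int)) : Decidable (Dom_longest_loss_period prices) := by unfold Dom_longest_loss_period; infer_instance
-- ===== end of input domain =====

-- B replaces A's single fused running-minimum loop with a segment decomposition
-- (nested loops: each strict running minimum heads a segment, reduced to the max
-- time among its strictly-higher prices); objective: alternative structure.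


-- ===== PORT A =====
-- A's loop; state `st` is (min_price, min_time), `none` standing for
-- (float('inf'), None): min_time is only read once a minimum was recorded.
def llpLoopA : List (Int × Int) → Option (Int × Int) → Int → Int
  | [], _, best => best
  | (t, p) :: rest, st, best =>
    let st' : Int × Int :=
      match st with
      | none => (p, t)
      | some (mp, mt) => if p < mp then (p, t) else (mp, mt)
    let best' := if p > st'.1 then max best (t - st'.2) else best
    llpLoopA rest (some st') best'

def longest_loss_period (prices : List (Int × Int)) : Int :=
  llpLoopA prices none 0

-- ===== PORT B =====
-- Source B's inner while loop: consume the rest of the current segment (prices ≥ the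
-- segment head price), accumulating the max time among strictly-greater prices;
-- returns (seg_best, remaining list).
def llpMaxOpt (acc : Option Int) (t : Int) : Int :=
  match acc with
  | none => t
  | some a => max a t

def llpInner (sp : Int) : Option Int → List (Int × Int) → Option Int × List (Int × Int)
  | acc, [] => (acc, [])
  | acc, (t, p) :: rest =>
    if p < sp then (acc, (t, p) :: rest)
    else llpInner sp (if p > sp then some (llpMaxOpt acc t) else acc) rest

-- termination measure for the outer loop (cited by name in decreasing_by)
theorem llpInner_length (sp : Int) : ∀ (acc : Option Int) (l : List (Int × Int)),
    (llpInner sp acc l).2.length ≤ l.length := by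
  intro acc l
  induction l generalizing acc with
  | nil => simp [llpInner]
  | cons hd tl ih =>
    obtain ⟨t, p⟩ := hd
    simp only [llpInner]
    split_ifs with h h2
    · simp
    · exact le_trans (ih _) (by simp)
    · exact le_trans (ih _) (by simp)

def llpCombine (best st : Int) (sb : Option Int) : Int :=
  match sb with
  | none => best
  | some m => max best (m - st)

-- Source B's outer while loop: each iteration consumes one segment.
def llpOuter (best : Int) : List (Int × Int) → Int
  | [] => best
  | (st, sp) :: rest =>
    let r := llpInner sp none rest
    llpOuter (llpCombine best st r.1) r.2
termination_by l => l.length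
decreasing_by
  exact Nat.lt_succ_of_le (llpInner_length sp none rest)

def longest_loss_period_alt (prices : List (Int × Int)) : Int :=
  llpOuter 0 prices

-- ===== PRECONDITION & SPEC =====
def Spec_longest_loss_period (prices : List (Int × Int)) (out : Int) : Prop := out = longest_loss_period_alt prices
instance (prices : List (Int × Int)) (out : Int) : Decidable (Spec_longest_loss_period prices out) := by unfold Spec_longest_loss_period; infer_instance

-- ===== CLAIM (what is proved, stated in full; the proofs are below) =====
def Claim_equal_longest_loss_period : Prop := ∀ (prices : List (Int × Int)), Dom_longest_loss_period prices → Spec_longest_loss_period prices (longest_loss_period prices)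

-- ===== LEMMAS AND PROOFS =====
theorem llpCombine_max (best st : Int) (sb : Option Int) (t : Int) :
    llpCombine best st (some (llpMaxOpt sb t)) = max (llpCombine best st sb) (t - st) := by
  cases sb <;> simp [llpCombine, llpMaxOpt] <;> omega

-- A's loop, run from state (sp, st), equals: finish the current segment with
-- llpInner, fold its result into `best`, and continue with llpOuter.
theorem llpLoopA_eq_segments : ∀ (n : ℕ) (l : List (Int × Int)) (sp st best : Int) (sb : Option Int),
    l.length ≤ n →
    llpLoopA l (some (sp, st)) (llpCombine best st sb) =
      llpOuter (llpCombine best st (llpInner sp sb l).1) (llpInner sp sb l).2 := by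
  intro n
  induction n with
  | zero =>
    intro l sp st best sb hl
    interval_cases h : l.length
    rw [List.length_eq_zero_iff] at h
    subst h
    simp [llpLoopA, llpInner, llpOuter]
  | succ n ih =>
    intro l sp st best sb hl
    match l with
    | [] => simp [llpLoopA, llpInner, llpOuter]
    | (t, p) :: rest =>
      simp only [List.length_cons, Nat.succ_le_succ_iff] at hl
      by_cases h : p < sp
      · -- new strict minimum: A switches state; B closes the segment here and
        -- llpOuter opens the next one at (t, p).
        have hA : llpLoopA ((t, p) :: rest) (some (sp, st)) (llpCombine best st sb) =
            llpLoopA rest (some (p, t)) (llpCombine best st sb) := by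
          simp [llpLoopA, h]
        have hI : llpInner sp sb ((t, p) :: rest) = (sb, (t, p) :: rest) := by
          simp [llpInner, h]
        rw [hA, hI]
        have hO : llpOuter (llpCombine best st sb) ((t, p) :: rest) =
            llpOuter (llpCombine (llpCombine best st sb) t (llpInner p none rest).1)
              (llpInner p none rest).2 := by
          simp [llpOuter]
        rw [hO]
        have := ih rest p t (llpCombine best st sb) none hl
        simpa [llpCombine] using this
      · -- staying in the segment
        push Not at h
        have hA : llpLoopA ((t, p) :: rest) (some (sp, st)) (llpCombine best st sb) =
            llpLoopA rest (some (sp, st))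
              (if p > sp then max (llpCombine best st sb) (t - st) else llpCombine best st sb) := by
          simp [llpLoopA, not_lt_of_ge h]
        have hI : llpInner sp sb ((t, p) :: rest) =
            llpInner sp (if p > sp then some (llpMaxOpt sb t) else sb) rest := by
          simp [llpInner, not_lt_of_ge h]
        rw [hA, hI]
        by_cases hgt : p > sp
        · simp only [hgt, if_pos]
          rw [← llpCombine_max best st sb t]
          exact ih rest sp st best (some (llpMaxOpt sb t)) hl
        · simp only [hgt]
          exact ih rest sp st best sb hl

-- ===== VERDICT (by name: the statement is the Claim_ definition above) =====
theorem longest_loss_period_spec : Claim_equal_longest_loss_period := by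
  intro prices _
  unfold Spec_longest_loss_period longest_loss_period longest_loss_period_alt
  match prices with
  | [] => simp [llpLoopA, llpOuter]
  | (t, p) :: rest =>
    have hA : llpLoopA ((t, p) :: rest) none 0 = llpLoopA rest (some (p, t)) 0 := by
      simp [llpLoopA]
    have hB : llpOuter 0 ((t, p) :: rest) =
        llpOuter (llpCombine 0 t (llpInner p none rest).1) (llpInner p none rest).2 := by
      simp [llpOuter]
    rw [hA, hB]
    have := llpLoopA_eq_segments rest.length rest p t 0 none le_rfl
    simpa [llpCombine] using this
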